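-- pv_equiv track=rewrite | github.com/oluatomi/TimetableGUI_project | models/Tt_algo_calc.py | align_chunklist_to_weightlist
-- ===== SOURCE A (Python) =====
-- def align_chunklist_to_weightlist(weightlist, chunklist):
--     """ The weightlist is the reference list here. the items in chunklist have the same len() as the integers
--     in weightlist. This function merely makes sure that those values are one-one mapped. and realigns if not """
--
--     ans = []
--     for item in weightlist:
--         chunklist_ = chunklist.copy()
--         for index, item_ in enumerate(chunklist_):
--             width = len(item_) if hasattr(item_, "__iter__") else 1
--             if width == item:
--                 ans.append(item_)
--                 chunklist.remove(item_)
--                 break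
--     return ans
-- ===== SOURCE B (Python) =====
-- # Buckets chunks by length once, then serves each weight from its bucket via a cursor:
-- # O(n+m) instead of A's per-weight copy-and-scan. Return-value equivalent only:
-- # A removes matched chunks from `chunklist` in place, B does not mutate it.
-- def align_chunklist_to_weightlist(weightlist, chunklist):
--     buckets = {}
--     for chunk in chunklist:
--         buckets.setdefault(len(chunk), []).append(chunk)
--     cursor = {}
--     ans = []
--     for weight in weightlist:
--         bucket = buckets.get(weight, [])
--         i = cursor.get(weight, 0)
--         if i < len(bucket):
--             ans.append(bucket[i])
--             cursor[weight] = i + 1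
--     return ans
-- ===== Notes on version B (the rewrite author's own statement) =====
-- stated objective: faster
-- what changed: Replaces A's per-weight copy-and-scan-and-remove of the chunklist with a single pass that buckets chunks by length, then serves each weight from its bucket through a cursor dictionary (A's in-place mutation of chunklist is not reproduced; return value is identical).
import Mathlib
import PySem

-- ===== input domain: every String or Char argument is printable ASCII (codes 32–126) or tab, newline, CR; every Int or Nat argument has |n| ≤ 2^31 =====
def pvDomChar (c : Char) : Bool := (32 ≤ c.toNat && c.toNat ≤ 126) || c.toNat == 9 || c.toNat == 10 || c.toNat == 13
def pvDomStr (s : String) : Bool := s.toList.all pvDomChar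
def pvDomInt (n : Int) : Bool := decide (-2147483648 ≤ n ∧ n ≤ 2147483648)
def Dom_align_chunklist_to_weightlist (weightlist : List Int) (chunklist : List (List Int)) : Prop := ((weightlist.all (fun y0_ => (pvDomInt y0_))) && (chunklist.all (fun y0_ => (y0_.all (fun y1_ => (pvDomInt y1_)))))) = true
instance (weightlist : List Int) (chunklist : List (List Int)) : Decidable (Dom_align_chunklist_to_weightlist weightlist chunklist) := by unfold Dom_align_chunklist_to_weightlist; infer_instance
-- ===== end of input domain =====

-- ===== PORT A =====
-- B changes the algorithm (one bucketing pass + cursors instead of per-weight scan-and-remove);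
-- equivalence is about the RETURN value only: Python A also removes matched chunks from `chunklist` in place.

-- inner loop of A: enumerate the copy, break at the first item_ whose width equals item
-- (width = len(item_): chunks are lists here, so the hasattr branch always takes len)
def pyFindWidth (xs : List (List Int)) (w : Int) : Option (List Int) :=
  match xs with
  | [] => none
  | x :: rest => if (x.length : Int) == w then some x else pyFindWidth rest w

def alignStepA (st : List (List Int) × List (List Int)) (item : Int) :
    List (List Int) × List (List Int) :=
  match pyFindWidth st.1 item with
  | some x => ((PySem.List.remove? st.1 x).getD st.1, st.2 ++ [x])  -- chunklist.remove(item_); found ⇒ remove? is some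
  | none => st

def align_chunklist_to_weightlist (weightlist : List Int) (chunklist : List (List Int)) : List (List Int) :=
  (weightlist.foldl alignStepA (chunklist, [])).2

-- ===== PORT B =====
def alignBuckets (chunklist : List (List Int)) : PySem.Dict Int (List (List Int)) :=
  chunklist.foldl (fun d c => d.modify ((c.length : Int)) [] (· ++ [c])) PySem.Dict.empty

def alignStepB (buckets : PySem.Dict Int (List (List Int)))
    (st : PySem.Dict Int Nat × List (List Int)) (weight : Int) :
    PySem.Dict Int Nat × List (List Int) :=
  let bucket := buckets.getD weight []
  let i := st.1.getD weight 0
  if i < bucket.length then (st.1.insert weight (i + 1), st.2 ++ [bucket.getD i []])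
  else st

def align_chunklist_to_weightlist_alt (weightlist : List Int) (chunklist : List (List Int)) : List (List Int) :=
  let buckets := alignBuckets chunklist
  (weightlist.foldl (alignStepB buckets) (PySem.Dict.empty, [])).2

-- ===== PRECONDITION & SPEC =====
def Spec_align_chunklist_to_weightlist (weightlist : List Int) (chunklist : List (List Int)) (out : List (List Int)) : Prop := out = align_chunklist_to_weightlist_alt weightlist chunklist
instance (weightlist : List Int) (chunklist : List (List Int)) (out : List (List Int)) : Decidable (Spec_align_chunklist_to_weightlist weightlist chunklist out) := by unfold Spec_align_chunklist_to_weightlist; infer_instance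

-- ===== CLAIM (what is proved, stated in full; the proofs are below) =====
def Claim_equal_align_chunklist_to_weightlist : Prop := ∀ (weightlist : List Int) (chunklist : List (List Int)), Dom_align_chunklist_to_weightlist weightlist chunklist → Spec_align_chunklist_to_weightlist weightlist chunklist (align_chunklist_to_weightlist weightlist chunklist)

-- ===== LEMMAS AND PROOFS =====

-- the length-w chunks of xs, in order
def filtLen (xs : List (List Int)) (w : Int) : List (List Int) :=
  xs.filter (fun c => (c.length : Int) == w)

-- A's inner loop finds the head of the length-w sublist
theorem pyFindWidth_eq_head (xs : List (List Int)) (w : Int) :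
    pyFindWidth xs w = (filtLen xs w).head? := by
  induction xs with
  | nil => rfl
  | cons x rest ih =>
    by_cases h : (x.length : Int) = w
    · simp [pyFindWidth, filtLen, h]
    · simp only [pyFindWidth, filtLen, List.filter_cons, beq_iff_eq, h]
      simpa [filtLen] using ih

theorem pyFindWidth_length (xs : List (List Int)) (w : Int) (x : List Int)
    (h : pyFindWidth xs w = some x) : (x.length : Int) = w := by
  induction xs with
  | nil => simp [pyFindWidth] at h
  | cons c rest ih =>
    by_cases hc : (c.length : Int) = w
    · simp [pyFindWidth, hc] at h
      simp_all
    · simp [pyFindWidth, hc] at h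
      exact ih h

theorem pyFindWidth_mem (xs : List (List Int)) (w : Int) (x : List Int)
    (h : pyFindWidth xs w = some x) : x ∈ xs := by
  induction xs with
  | nil => simp [pyFindWidth] at h
  | cons c rest ih =>
    by_cases hc : (c.length : Int) = w
    · simp [pyFindWidth, hc] at h
      simp [h]
    · simp [pyFindWidth, hc] at h
      exact List.mem_cons_of_mem _ (ih h)

-- removing the element A found = dropping the first length-w chunk
def removeLen (xs : List (List Int)) (w : Int) : List (List Int) :=
  match xs with
  | [] => []
  | c :: cs => if (c.length : Int) == w then cs else c :: removeLen cs w

theorem remove_found_eq_removeLen (xs : List (List Int)) (w : Int) (x : List Int)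
    (h : pyFindWidth xs w = some x) :
    (PySem.List.remove? xs x).getD xs = removeLen xs w := by
  induction xs with
  | nil => simp [pyFindWidth] at h
  | cons c rest ih =>
    by_cases hc : (c.length : Int) = w
    · simp [pyFindWidth, hc] at h
      subst h
      simp [removeLen, hc]
    · have h' : pyFindWidth rest w = some x := by simpa [pyFindWidth, hc] using h
      have hxlen : (x.length : Int) = w := pyFindWidth_length rest w x h'
      have hne : c ≠ x := fun he => hc (by rw [he]; exact hxlen)
      have hmem : x ∈ rest := pyFindWidth_mem rest w x h'
      obtain ⟨r, hr⟩ : ∃ r, PySem.List.remove? rest x = some r := by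
        rcases hq : PySem.List.remove? rest x with _ | r
        · exact absurd ((PySem.List.remove?_eq_none_iff rest x).1 hq) (by simp [hmem])
        · exact ⟨r, rfl⟩
      rw [PySem.List.remove?_cons_of_ne rest hne, hr]
      have ih' := ih h'
      rw [hr] at ih'
      simp [removeLen, hc, ← ih']

-- effect of removeLen on each length class
theorem filtLen_removeLen_self (xs : List (List Int)) (w : Int) :
    filtLen (removeLen xs w) w = (filtLen xs w).tail := by
  induction xs with
  | nil => rfl
  | cons c cs ih =>
    by_cases hc : (c.length : Int) = w
    · simp [removeLen, filtLen, hc]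
    · simp only [filtLen] at ih
      simp [removeLen, filtLen, hc, ih]

theorem filtLen_removeLen_of_ne (xs : List (List Int)) (w v : Int) (hvw : v ≠ w)
    (hne : filtLen xs w ≠ []) :
    filtLen (removeLen xs w) v = filtLen xs v := by
  induction xs with
  | nil => rfl
  | cons c cs ih =>
    by_cases hc : (c.length : Int) = w
    · simp [removeLen, filtLen, hc, hvw.symm]
    · have hne' : filtLen cs w ≠ [] := by
        simpa [filtLen, List.filter_cons, hc] using hne
      have h2 := ih hne'
      simp only [filtLen] at h2 ⊢
      simp only [removeLen, beq_iff_eq, hc, if_false, List.filter_cons]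
      split_ifs <;> simp [h2]

-- the bucket dictionary holds exactly the length classes of the original chunklist
theorem foldl_modify_key (l : List (List Int)) (d : PySem.Dict Int (List (List Int))) :
    l.foldl (fun d c => d.modify ((c.length : Int)) [] (· ++ [c])) d
      = (l.map (fun c => ((c.length : Int), c))).foldl
          (fun d p => d.modify p.1 [] (· ++ [p.2])) d := by
  induction l generalizing d with
  | nil => rfl
  | cons c cs ih => simp [List.foldl_cons, ih]

theorem alignBuckets_getD (chunklist : List (List Int)) (w : Int) :
    (alignBuckets chunklist).getD w [] = filtLen chunklist w := by
  unfold alignBuckets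
  rw [foldl_modify_key, PySem.Dict.getD_foldl_modify_append]
  simp only [PySem.Dict.getD_empty, List.nil_append]
  induction chunklist with
  | nil => rfl
  | cons c cs ih =>
    by_cases hc : (c.length : Int) = w
    · simp only [List.map_cons, List.filter_cons, filtLen] at ih ⊢
      simp [hc, ih]
    · simp only [List.map_cons, List.filter_cons, filtLen] at ih ⊢
      simp [hc, ih]

-- the main fold invariant: B's cursors track exactly what A has removed, per length class
theorem align_loop_eq (wl : List Int) (cl ck ans : List (List Int))
    (cursor : PySem.Dict Int Nat)
    (hinv : ∀ w : Int, (filtLen cl w).drop (cursor.getD w 0) = filtLen ck w) :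
    (wl.foldl alignStepA (ck, ans)).2
      = (wl.foldl (alignStepB (alignBuckets cl)) (cursor, ans)).2 := by
  induction wl generalizing ck ans cursor with
  | nil => rfl
  | cons item rest ih =>
    simp only [List.foldl_cons]
    have hbucket : (alignBuckets cl).getD item [] = filtLen cl item :=
      alignBuckets_getD cl item
    have hdrop := hinv item
    by_cases hlt : cursor.getD item 0 < (filtLen cl item).length
    · -- a chunk of this length remains
      have hne : filtLen ck item ≠ [] := by
        intro h0
        rw [h0] at hdrop
        have := congrArg List.length hdrop
        simp [List.length_drop] at this
        omega
      obtain ⟨x, xs, hx⟩ := List.exists_cons_of_ne_nil hne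
      have hfind : pyFindWidth ck item = some x := by
        rw [pyFindWidth_eq_head, hx]; rfl
      have hget : (filtLen cl item).getD (cursor.getD item 0) [] = x := by
        have hd : (filtLen cl item).drop (cursor.getD item 0) = x :: xs := by
          rw [hdrop, hx]
        have h0 := congrArg (fun l => l.getD 0 ([] : List Int)) hd
        simpa [List.getD_eq_getElem?_getD, List.getElem?_drop] using h0
      have hstepA : alignStepA (ck, ans) item = (removeLen ck item, ans ++ [x]) := by
        simp only [alignStepA, hfind]
        rw [remove_found_eq_removeLen ck item x hfind]
      have hstepB : alignStepB (alignBuckets cl) (cursor, ans) item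
          = (cursor.insert item (cursor.getD item 0 + 1), ans ++ [x]) := by
        simp only [alignStepB, hbucket]
        rw [if_pos hlt, hget]
      rw [hstepA, hstepB]
      apply ih
      intro w
      by_cases hw : w = item
      · subst hw
        rw [PySem.Dict.getD_insert_self, filtLen_removeLen_self, ← hdrop,
          List.tail_drop]
      · rw [PySem.Dict.getD_insert_of_ne cursor _ _ hw,
          filtLen_removeLen_of_ne ck item w hw hne]
        exact hinv w
    · -- this length class is exhausted
      have hempty : filtLen ck item = [] := by
        rw [← hdrop]
        exact List.drop_eq_nil_of_le (by omega)
      have hfind : pyFindWidth ck item = none := by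
        rw [pyFindWidth_eq_head, hempty]; rfl
      have hstepA : alignStepA (ck, ans) item = (ck, ans) := by
        simp [alignStepA, hfind]
      have hstepB : alignStepB (alignBuckets cl) (cursor, ans) item = (cursor, ans) := by
        simp only [alignStepB, hbucket]
        rw [if_neg hlt]
      rw [hstepA, hstepB]
      exact ih ck ans cursor hinv

-- ===== VERDICT (by name: the statement is the Claim_ definition above) =====
theorem align_chunklist_to_weightlist_spec : Claim_equal_align_chunklist_to_weightlist := by
  intro weightlist chunklist _
  unfold Spec_align_chunklist_to_weightlist align_chunklist_to_weightlist
    align_chunklist_to_weightlist_alt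
  exact align_loop_eq weightlist chunklist chunklist [] PySem.Dict.empty
    (fun w => by simp [PySem.Dict.getD_empty])
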